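-- pv_equiv track=rewrite | github.com/tudor-costache/glc | cleanup_report.py | pick_event
-- ===== SOURCE A (Python) =====
-- def pick_event(events, date_str=None):
--     if not events:
--         raise ValueError("No events in CSV.")
--     if date_str:
--         matches = [e for e in events if e["date"] == date_str]
--         if not matches:
--             raise ValueError(f"No event found for date {date_str}")
--         return matches[-1]
--     return events[-1]   # most recent row
-- ===== SOURCE B (Python) =====
-- def pick_event(events, date_str=None):
--     if not events:
--         raise ValueError("No events in CSV.")
--     if date_str:
--         for e in reversed(events):
--             if e["date"] == date_str:
--                 return e
--         raise ValueError(f"No event found for date {date_str}")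
--     return events[-1]
-- ===== Notes on version B (the rewrite author's own statement) =====
-- stated objective: simpler
-- what changed: Instead of building the full list of matching events and taking its last element, B scans the events in reverse and returns the first match (early exit, no intermediate list).
import Mathlib
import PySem

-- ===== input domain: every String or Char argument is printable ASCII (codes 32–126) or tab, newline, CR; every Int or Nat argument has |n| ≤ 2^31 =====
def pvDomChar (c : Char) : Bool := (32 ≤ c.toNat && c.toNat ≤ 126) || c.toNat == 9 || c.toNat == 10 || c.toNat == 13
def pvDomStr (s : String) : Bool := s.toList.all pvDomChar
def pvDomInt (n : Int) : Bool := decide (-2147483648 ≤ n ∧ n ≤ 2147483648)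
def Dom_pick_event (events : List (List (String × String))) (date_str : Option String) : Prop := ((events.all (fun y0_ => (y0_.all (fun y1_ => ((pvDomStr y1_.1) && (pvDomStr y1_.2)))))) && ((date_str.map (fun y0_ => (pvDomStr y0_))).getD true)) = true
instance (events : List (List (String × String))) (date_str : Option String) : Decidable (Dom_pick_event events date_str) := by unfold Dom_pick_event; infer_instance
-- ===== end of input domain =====

-- B replaces A's "collect all ms, return the last" comprehension by a reverse scan
-- returning the first match (objective: simpler — early exit, no intermediate list).

-- ===== PORT A =====
-- literal transliteration of A: empty check, then comprehension filter + ms[-1], else events[-1]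
def pick_event (events : List (List (String × String))) (date_str : Option String) : List (String × String) :=
  if events.isEmpty then []   -- Python raises ValueError here; excluded by Pre_
  else
    match date_str with
    | some s =>
      if s ≠ "" then
        let ms := events.filter (fun e => (PySem.Dict.mk e).get? "date" == some s)
        if ms.isEmpty then []   -- Python raises ValueError here; excluded by Pre_
        else PySem.List.pyGetD ms (-1) []
      else PySem.List.pyGetD events (-1) []
    | none => PySem.List.pyGetD events (-1) []

-- ===== PORT B =====
-- B's loop: scan the reversed list, return the first event whose "date" equals s
def pickRev (l : List (List (String × String))) (s : String) : List (String × String) :=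
  match l with
  | [] => []   -- Python raises ValueError here; excluded by Pre_
  | e :: rest => if (PySem.Dict.mk e).get? "date" == some s then e else pickRev rest s

def pick_event_alt (events : List (List (String × String))) (date_str : Option String) : List (String × String) :=
  if events.isEmpty then []   -- Python raises ValueError here; excluded by Pre_
  else
    match date_str with
    | some s =>
      if s ≠ "" then pickRev events.reverse s
      else PySem.List.pyGetD events (-1) []
    | none => PySem.List.pyGetD events (-1) []

-- ===== PRECONDITION & SPEC =====
-- Pre_ excludes exactly the inputs on which A raises: empty events (ValueError), a truthy
-- date_str with an event lacking the "date" key (KeyError), and a truthy date_str with no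
-- matching event (ValueError).
def Pre_pick_event (events : List (List (String × String))) (date_str : Option String) : Prop :=
  events ≠ [] ∧
  (∀ s, date_str = some s → s ≠ "" →
    (∀ e ∈ events, ((PySem.Dict.mk e).get? "date").isSome) ∧
    (∃ e ∈ events, (PySem.Dict.mk e).get? "date" = some s))
instance (events : List (List (String × String))) (date_str : Option String) : Decidable (Pre_pick_event events date_str) := by unfold Pre_pick_event; infer_instance

def pvWitness_pick_event : (List (List (String × String))) × Option String :=
  ([[("date", "2024-01-01"), ("name", "a")], [("date", "2024-01-02"), ("name", "b")]], some "2024-01-01")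

def Spec_pick_event (events : List (List (String × String))) (date_str : Option String) (out : List (String × String)) : Prop := out = pick_event_alt events date_str
instance (events : List (List (String × String))) (date_str : Option String) (out : List (String × String)) : Decidable (Spec_pick_event events date_str out) := by unfold Spec_pick_event; infer_instance

-- ===== CLAIM (what is proved, stated in full; the proofs are below) =====
def Claim_equal_pick_event : Prop := ∀ (events : List (List (String × String))) (date_str : Option String), Dom_pick_event events date_str → Pre_pick_event events date_str → Spec_pick_event events date_str (pick_event events date_str)

-- ===== LEMMAS AND PROOFS =====

-- B's reverse scan is the first match of the list
theorem pickRev_eq_find? (l : List (List (String × String))) (s : String) :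
    pickRev l s = ((l.find? (fun e => (PySem.Dict.mk e).get? "date" == some s)).getD []) := by
  induction l with
  | nil => rfl
  | cons e rest ih =>
    simp only [pickRev, List.find?]
    rcases h : ((PySem.Dict.mk e).get? "date" == some s) with _ | _ <;> simp [ih]

-- last of the filtered list = first match of the reversed list
theorem getLast?_filter_eq_find?_reverse {α : Type} (l : List α) (p : α → Bool) :
    (l.filter p).getLast? = (l.reverse.find? p) := by
  rw [List.getLast?_eq_head?_reverse, ← List.filter_reverse, List.head?_filter]

-- ===== VERDICT =====
theorem pick_event_spec : Claim_equal_pick_event := by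
  intro events date_str _hdom ⟨hne, hdate⟩
  unfold Spec_pick_event pick_event pick_event_alt
  simp only [List.isEmpty_iff, if_neg hne]
  match date_str with
  | none => rfl
  | some s =>
    by_cases hs : s = ""
    · simp [hs]
    · obtain ⟨_, e, he, hes⟩ := hdate s rfl hs
      have hmem : e ∈ events.filter (fun e => (PySem.Dict.mk e).get? "date" == some s) := by
        simp [List.mem_filter, he, hes]
      have hfne : events.filter (fun e => (PySem.Dict.mk e).get? "date" == some s) ≠ [] :=
        List.ne_nil_of_mem hmem
      simp only [if_neg hfne,
        PySem.List.pyGetD_neg_one _ _ hfne, pickRev_eq_find?,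
        ← getLast?_filter_eq_find?_reverse]
      rw [List.getLast?_eq_some_getLast hfne]
      rfl
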